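-- pv_equiv track=rewrite | github.com/Kaiqi-Liang/LeetCode | python/can_i_win.py | can_player_1_force_win
-- ===== SOURCE A (Python) =====
-- def can_player_1_force_win(n: int, target: int) -> bool:
--     options = tuple(i for i in range(1, n + 1))
--     cache: dict[tuple[int, ...], bool] = {}
--
--     def determine_win(options: tuple[int, ...], difference: int) -> bool:
--         key = tuple(options)
--         if key in cache:
--             return cache[key]
--         is_won = False
--         for option in options:
--             if option >= difference:
--                 cache[key] = True
--                 return True
--             if not determine_win(tuple(o for o in options if o != option), difference - option):
--                 is_won = True
--                 break
--         cache[key] = is_won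
--         return is_won
--     return determine_win(options, target)
-- ===== SOURCE B (Python) =====
-- def can_player_1_force_win(n: int, target: int) -> bool:
--     # Bottom-up DP over bitmasks of the available numbers 1..n: bit j set means
--     # number j+1 is still available; the remaining difference is determined by
--     # the mask alone: target - (total - sum(available)).
--     if n <= 0:
--         return False
--     if target <= n:
--         # some single pick already reaches the target
--         return True
--     full = (1 << n) - 1
--     total = n * (n + 1) // 2
--     win = [False] * (full + 1)  # win[0] = False: no numbers left, current player loses
--     for mask in range(1, full + 1):
--         s = sum(j + 1 for j in range(n) if (mask >> j) & 1 == 1)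
--         d = target - (total - s)
--         win[mask] = any((mask >> j) & 1 == 1 and (d <= j + 1 or not win[mask ^ (1 << j)])
--                         for j in range(n))
--     return win[full]
-- ===== Notes on version B (the rewrite author's own statement) =====
-- stated objective: alternative
-- what changed: Replaces the top-down memoized recursion on tuples of remaining options with a bottom-up DP over bitmasks of the available numbers 1..n (the remaining difference is a function of the mask), plus the immediate-win shortcut target <= n.
import Mathlib
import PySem

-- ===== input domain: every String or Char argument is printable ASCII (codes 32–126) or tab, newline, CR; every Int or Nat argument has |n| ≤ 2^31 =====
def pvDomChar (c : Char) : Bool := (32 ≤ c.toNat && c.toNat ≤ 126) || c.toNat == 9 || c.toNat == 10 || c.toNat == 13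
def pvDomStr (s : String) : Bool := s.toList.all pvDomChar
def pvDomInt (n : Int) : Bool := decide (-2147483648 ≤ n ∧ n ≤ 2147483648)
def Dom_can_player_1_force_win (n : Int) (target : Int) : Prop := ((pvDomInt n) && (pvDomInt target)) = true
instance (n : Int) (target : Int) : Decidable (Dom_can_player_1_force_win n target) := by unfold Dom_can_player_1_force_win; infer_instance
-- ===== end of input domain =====

-- B replaces A's top-down memoized recursion on tuples by a bottom-up bitmask DP
-- (plus the immediate-win shortcut target ≤ n); same return value, no speed claim.

-- ===== PORT A =====
-- A's inner `determine_win` threads the mutated cache; the loop over the options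
-- tuple is `pvGoA` (with early returns); `fuel` bounds the recursion depth and is
-- always sufficient at the call sites (each recursive call shrinks the tuple).
mutual
def pvDwinA (fuel : Nat) (cache : PySem.Dict (List Int) Bool) (options : List Int)
    (difference : Int) : Bool × PySem.Dict (List Int) Bool :=
  match fuel with
  | 0 => (false, cache)
  | fuel + 1 =>
    match cache.get? options with
    | some b => (b, cache)
    | none => pvGoA fuel cache options difference options
termination_by (fuel, 0)
decreasing_by all_goals simp_wf; omega

def pvGoA (fuel : Nat) (cache : PySem.Dict (List Int) Bool) (options : List Int)
    (difference : Int) (rest : List Int) : Bool × PySem.Dict (List Int) Bool :=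
  match rest with
  | [] => (false, cache.insert options false)
  | option :: rest =>
    if difference ≤ option then (true, cache.insert options true)
    else
      let r := pvDwinA fuel cache (options.filter (fun o => o != option)) (difference - option)
      if r.1 = false then (true, r.2.insert options true)
      else pvGoA fuel r.2 options difference rest
termination_by (fuel, rest.length + 1)
decreasing_by all_goals simp_wf; omega
end

def can_player_1_force_win (n : Int) (target : Int) : Bool :=
  let options := PySem.List.pyRange 1 (n + 1) 1
  (pvDwinA (options.length + 1) PySem.Dict.empty options target).1

-- ===== PORT B =====
def can_player_1_force_win_alt (n : Int) (target : Int) : Bool :=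
  if n ≤ 0 then false
  else if target ≤ n then true
  else
    let nn := n.toNat
    let full := 2 ^ nn - 1
    let total := PySem.Int.floordiv (n * (n + 1)) 2
    let win := (List.range' 1 full).foldl (fun (w : List Bool) mask =>
      let s := (((List.range nn).filter (fun j => (mask >>> j) &&& 1 == 1)).map
                  (fun j : Nat => (j : Int) + 1)).sum
      let d := target - (total - s)
      w.set mask ((List.range nn).any (fun j =>
        ((mask >>> j) &&& 1 == 1) &&
          (decide (d ≤ (j : Int) + 1) || ! (w.getD (mask ^^^ (1 <<< j)) false)))))
      (List.replicate (full + 1) false)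
    win.getD full false

-- ===== PRECONDITION & SPEC =====
def Spec_can_player_1_force_win (n : Int) (target : Int) (out : Bool) : Prop := out = can_player_1_force_win_alt n target
instance (n : Int) (target : Int) (out : Bool) : Decidable (Spec_can_player_1_force_win n target out) := by unfold Spec_can_player_1_force_win; infer_instance

-- ===== CLAIM (what is proved, stated in full; the proofs are below) =====
def Claim_equal_can_player_1_force_win : Prop := ∀ (n : Int) (target : Int), Dom_can_player_1_force_win n target → Spec_can_player_1_force_win n target (can_player_1_force_win n target)

-- ===== LEMMAS AND PROOFS =====

-- Pure minimax value of a set of remaining options (fuel-indexed; the difference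
-- is recomputed from the options as  t - (T - sum opts)).
def pvW (T t : Int) : Nat → List Int → Bool
  | 0, _ => false
  | fuel + 1, opts =>
    opts.any (fun o => decide (t - (T - opts.sum) ≤ o) ||
      ! pvW T t fuel (opts.filter (fun x => x != o)))

def pvWs (T t : Int) (opts : List Int) : Bool := pvW T t opts.length opts

lemma pvW_filter_lt {opts : List Int} {o : Int} (h : o ∈ opts) :
    (opts.filter (fun x => x != o)).length < opts.length :=
  List.length_filter_lt_length_iff_exists.mpr ⟨o, h, by simp⟩

lemma pvW_irrel (T t : Int) : ∀ (f g : Nat) (opts : List Int),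
    opts.length ≤ f → opts.length ≤ g → pvW T t f opts = pvW T t g opts := by
  intro f
  induction f with
  | zero =>
    intro g opts hf _
    have : opts = [] := List.length_eq_zero_iff.mp (Nat.le_zero.mp hf)
    subst this
    cases g <;> simp [pvW]
  | succ f ih =>
    intro g opts hf hg
    match g, opts with
    | g, [] => cases g <;> simp [pvW]
    | 0, o :: rest => simp at hg
    | g + 1, o :: rest =>
      show pvW T t (f+1) (o :: rest) = pvW T t (g+1) (o :: rest)
      simp only [pvW]
      apply PySem.List.any_congr_mem
      intro a ha
      have hlt := pvW_filter_lt (opts := o :: rest) (o := a) ha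
      simp only [List.length_cons] at hf hg hlt
      rw [ih f (((o :: rest)).filter (fun x => x != a)) (by omega) (by omega)]
      rw [ih g (((o :: rest)).filter (fun x => x != a)) (by omega) (by omega)]

lemma pvWs_eq (T t : Int) (opts : List Int) :
    pvWs T t opts = opts.any (fun o => decide (t - (T - opts.sum) ≤ o) ||
      ! pvWs T t (opts.filter (fun x => x != o))) := by
  match opts with
  | [] => simp [pvWs, pvW]
  | o :: rest =>
    show pvW T t (rest.length + 1) (o :: rest) = _
    simp only [pvW]
    apply PySem.List.any_congr_mem
    intro a ha
    have hlt := pvW_filter_lt (opts := o :: rest) (o := a) ha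
    simp only [List.length_cons] at hlt
    rw [pvW_irrel T t rest.length ((o :: rest).filter (fun x => x != a)).length
      (((o :: rest)).filter (fun x => x != a)) (by omega) le_rfl]
    rfl

-- every cache entry agrees with the pure minimax value
def pvSound (T t : Int) (c : PySem.Dict (List Int) Bool) : Prop :=
  ∀ k b, c.get? k = some b → b = pvWs T t k

lemma pvSum_filter {opts : List Int} {o : Int} (hnd : opts.Nodup) (ho : o ∈ opts) :
    (opts.filter (fun x => x != o)).sum = opts.sum - o := by
  rw [← hnd.erase_eq_filter o]
  have h2 : opts.sum = o + (opts.erase o).sum := by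
    simpa using (List.perm_cons_erase ho).sum_eq
  omega

lemma pvSound_insert {T t : Int} {c : PySem.Dict (List Int) Bool} {opts : List Int} {b : Bool}
    (hs : pvSound T t c) (hb : b = pvWs T t opts) : pvSound T t (c.insert opts b) := by
  intro k v hk
  rw [PySem.Dict.get?_insert] at hk
  by_cases hek : k = opts
  · rw [if_pos hek] at hk
    cases hk
    rw [hek, ← hb]
  · rw [if_neg hek] at hk
    exact hs k v hk

lemma pvDwinA_correct (T t : Int) : ∀ (fuel : Nat) (c : PySem.Dict (List Int) Bool)
    (opts : List Int) (d : Int), opts.Nodup → opts.length < fuel →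
    d = t - (T - opts.sum) → pvSound T t c →
    (pvDwinA fuel c opts d).1 = pvWs T t opts ∧ pvSound T t (pvDwinA fuel c opts d).2 := by
  intro fuel
  induction fuel with
  | zero => intro c opts d _ h; omega
  | succ fuel ih =>
    intro c opts d hnd hlen hd hs
    subst hd
    simp only [pvDwinA]
    cases hc : c.get? opts with
    | some b =>
      exact ⟨(hs opts b hc), hs⟩
    | none =>
      suffices hgo : ∀ (rest pre : List Int) (c' : PySem.Dict (List Int) Bool),
          opts = pre ++ rest → pvSound T t c' →
          (∀ o ∈ pre, (decide (t - (T - opts.sum) ≤ o) ||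
            ! pvWs T t (opts.filter (fun x => x != o))) = false) →
          (pvGoA fuel c' opts (t - (T - opts.sum)) rest).1 = pvWs T t opts ∧
            pvSound T t (pvGoA fuel c' opts (t - (T - opts.sum)) rest).2 by
        exact hgo opts [] c rfl hs (by simp)
      intro rest
      induction rest with
      | nil =>
        intro pre c' hsplit hs' hpre
        have hpe : opts = pre := by simpa using hsplit
        have hw : pvWs T t opts = false := by
          rw [pvWs_eq]
          apply List.any_eq_false.mpr
          intro o ho
          rw [Bool.not_eq_true]
          exact hpre o (hpe ▸ ho)
        simp only [pvGoA]
        exact ⟨by simpa using hw.symm, pvSound_insert hs' hw.symm⟩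
      | cons o rest' ihr =>
        intro pre c' hsplit hs' hpre
        have ho : o ∈ opts := by rw [hsplit]; simp
        have hwin_true : (decide (t - (T - opts.sum) ≤ o) ||
            ! pvWs T t (opts.filter (fun x => x != o))) = true → pvWs T t opts = true := by
          intro hsucc
          rw [pvWs_eq]
          exact List.any_eq_true.mpr ⟨o, ho, hsucc⟩
        simp only [pvGoA]
        by_cases hge : t - (T - opts.sum) ≤ o
        · rw [if_pos hge]
          have hw : pvWs T t opts = true := hwin_true (by simp [hge])
          exact ⟨hw.symm, pvSound_insert hs' hw.symm⟩
        · rw [if_neg hge]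
          have hchild := ih c' (opts.filter (fun x => x != o)) (t - (T - opts.sum) - o)
            (hnd.filter _)
            (by have := pvW_filter_lt ho; omega)
            (by rw [pvSum_filter hnd ho]; ring)
            hs'
          obtain ⟨h1, h2⟩ := hchild
          by_cases hres : (pvDwinA fuel c' (opts.filter (fun x => x != o))
              (t - (T - opts.sum) - o)).1 = false
          · rw [if_pos hres]
            have hw : pvWs T t opts = true := hwin_true (by rw [← h1, hres]; simp)
            exact ⟨hw.symm, pvSound_insert h2 hw.symm⟩
          · rw [if_neg hres]
            have hct : pvWs T t (opts.filter (fun x => x != o)) = true := by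
              rw [← h1]; exact Bool.not_eq_false _ |>.mp hres
            apply ihr (pre ++ [o])
            · rw [hsplit, List.append_assoc]; rfl
            · exact h2
            · intro a ha
              rcases List.mem_append.mp ha with hpa | hoa
              · exact hpre a hpa
              · have : a = o := by simpa using hoa
                subst this
                simp [hge, hct]

-- options list encoded by a bitmask: bit j set means number j+1 is available
def pvOpts (nn : Nat) (mask : Nat) : List Int :=
  ((List.range nn).filter (fun j => mask.testBit j)).map (fun j : Nat => (j : Int) + 1)

lemma pvBit (m j : Nat) : ((m >>> j) &&& 1 == 1) = m.testBit j := by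
  simp [Nat.testBit, Nat.and_one_is_mod, Nat.one_and_eq_mod_two]

lemma pvOpts_zero (nn : Nat) : pvOpts nn 0 = [] := by
  simp [pvOpts]

lemma pvWs_nil (T t : Int) : pvWs T t [] = false := by
  simp [pvWs, pvW]

lemma pvXor_lt {mask j : Nat} (hbit : mask.testBit j = true) :
    mask ^^^ (1 <<< j) < mask := by
  apply Nat.lt_of_testBit j
  · simp [Nat.testBit_xor, Nat.one_shiftLeft, hbit]
  · exact hbit
  · intro k hk
    simp [Nat.testBit_xor, Nat.one_shiftLeft, Nat.ne_of_lt hk]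

lemma pvOpts_child {nn mask j : Nat} (hbit : mask.testBit j = true) :
    (pvOpts nn mask).filter (fun x => x != (j : Int) + 1) = pvOpts nn (mask ^^^ (1 <<< j)) := by
  simp only [pvOpts]
  rw [List.filter_map, List.filter_filter]
  congr 1
  apply List.filter_congr
  intro i _
  by_cases h : i = j
  · subst h
    simp [Function.comp, Nat.testBit_xor, Nat.one_shiftLeft, hbit]
  · have hji : ¬(j = i) := fun hh => h hh.symm
    have hne : ¬((i : Int) + 1 = (j : Int) + 1) := by omega
    simp [Function.comp, Nat.testBit_xor, Nat.one_shiftLeft, hji, hne]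

lemma pvStep (nn : Nat) (total target : Int) (mask : Nat) (w : List Bool)
    (hw : ∀ j, j < nn → mask.testBit j = true →
      w.getD (mask ^^^ (1 <<< j)) false = pvWs total target (pvOpts nn (mask ^^^ (1 <<< j)))) :
    ((List.range nn).any (fun j =>
      ((mask >>> j) &&& 1 == 1) &&
        (decide (target - (total - (((List.range nn).filter (fun j => (mask >>> j) &&& 1 == 1)).map
            (fun j : Nat => (j : Int) + 1)).sum) ≤ (j : Int) + 1) ||
          ! (w.getD (mask ^^^ (1 <<< j)) false))))
    = pvWs total target (pvOpts nn mask) := by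
  simp only [pvBit]
  rw [pvWs_eq]
  simp only [pvOpts]
  rw [List.any_map, List.any_filter]
  apply PySem.List.any_congr_mem
  intro j hj
  by_cases hb : mask.testBit j
  · have hj' : j < nn := List.mem_range.mp hj
    rw [hw j hj' hb, ← pvOpts_child hb]
    simp [pvOpts, hb]
  · simp [hb]

-- the DP table invariant: after processing masks 1..m every cell i ≤ m holds the
-- minimax value of the option set encoded by i
lemma pvB_inv (nn : Nat) (total target : Int) : ∀ (m : Nat), m ≤ 2 ^ nn - 1 →
    (((List.range' 1 m).foldl (fun (w : List Bool) mask =>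
      let s := (((List.range nn).filter (fun j => (mask >>> j) &&& 1 == 1)).map
                  (fun j : Nat => (j : Int) + 1)).sum
      let d := target - (total - s)
      w.set mask ((List.range nn).any (fun j =>
        ((mask >>> j) &&& 1 == 1) &&
          (decide (d ≤ (j : Int) + 1) || ! (w.getD (mask ^^^ (1 <<< j)) false)))))
      (List.replicate (2 ^ nn - 1 + 1) false)).length = 2 ^ nn - 1 + 1) ∧
    (∀ i, i ≤ m →
      (((List.range' 1 m).foldl (fun (w : List Bool) mask =>
        let s := (((List.range nn).filter (fun j => (mask >>> j) &&& 1 == 1)).map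
                    (fun j : Nat => (j : Int) + 1)).sum
        let d := target - (total - s)
        w.set mask ((List.range nn).any (fun j =>
          ((mask >>> j) &&& 1 == 1) &&
            (decide (d ≤ (j : Int) + 1) || ! (w.getD (mask ^^^ (1 <<< j)) false)))))
        (List.replicate (2 ^ nn - 1 + 1) false)).getD i false) = pvWs total target (pvOpts nn i)) := by
  intro m
  induction m with
  | zero =>
    intro _
    refine ⟨by simp, ?_⟩
    intro i hi
    have : i = 0 := Nat.le_zero.mp hi
    subst this
    simp [pvOpts_zero, pvWs_nil, List.getD_eq_getElem?_getD]
  | succ m ihm =>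
    intro hm
    obtain ⟨hlen, hinv⟩ := ihm (by omega)
    rw [List.range'_concat, List.foldl_append, List.foldl_cons, List.foldl_nil]
    simp only [Nat.one_mul, Nat.add_comm 1 m]
    refine ⟨by simpa using hlen, ?_⟩
    intro i hi
    rcases Nat.lt_or_ge i (m + 1) with hilt | hieq
    · -- untouched cell
      rw [List.getD_eq_getElem?_getD, List.getElem?_set_ne (by omega),
        ← List.getD_eq_getElem?_getD]
      exact hinv i (by omega)
    · have hieq : i = m + 1 := by omega
      subst hieq
      rw [List.getD_eq_getElem?_getD, List.getElem?_set_self (by rw [hlen]; omega)]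
      simp only [Option.getD_some]
      apply pvStep
      intro j hj hb
      have hlt : (m + 1) ^^^ (1 <<< j) < m + 1 := pvXor_lt hb
      exact hinv ((m + 1) ^^^ (1 <<< j)) (by omega)


lemma pvSum_range (nn : Nat) :
    2 * ((List.range nn).map (fun j : Nat => (j : Int) + 1)).sum = (nn : Int) * ((nn : Int) + 1) := by
  induction nn with
  | zero => simp
  | succ k ih =>
    rw [List.range_succ, List.map_append, List.sum_append]
    simp only [List.map_cons, List.map_nil, List.sum_cons, List.sum_nil]
    push_cast
    push_cast at ih
    linear_combination ih

lemma pvOpts_full (nn : Nat) :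
    pvOpts nn (2 ^ nn - 1) = (List.range nn).map (fun j : Nat => (j : Int) + 1) := by
  unfold pvOpts
  congr 1
  simp only [Nat.testBit_two_pow_sub_one]
  apply List.filter_eq_self.mpr
  intro a ha
  simp [List.mem_range.mp ha]

lemma pvPyRange (n : Int) (h : 0 ≤ n) :
    PySem.List.pyRange 1 (n + 1) 1 = (List.range n.toNat).map (fun j : Nat => (j : Int) + 1) := by
  rw [PySem.List.pyRange_one]
  have h1 : (n + 1 - 1).toNat = n.toNat := by omega
  rw [h1]
  apply List.map_congr_left
  intro a _
  omega

lemma pvA_eq (n target : Int) : can_player_1_force_win n target =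
    pvWs (PySem.List.pyRange 1 (n + 1) 1).sum target (PySem.List.pyRange 1 (n + 1) 1) := by
  have hs : pvSound (PySem.List.pyRange 1 (n + 1) 1).sum target PySem.Dict.empty := by
    intro k b hk
    rw [PySem.Dict.get?_empty] at hk
    cases hk
  exact (pvDwinA_correct (PySem.List.pyRange 1 (n + 1) 1).sum target
    ((PySem.List.pyRange 1 (n + 1) 1).length + 1) PySem.Dict.empty
    (PySem.List.pyRange 1 (n + 1) 1) target
    (PySem.List.nodup_pyRange_one 1 (n+1)) (by omega) (by ring) hs).1

-- ===== VERDICT (by name: the statement is the Claim_ definition above) =====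
theorem can_player_1_force_win_spec : Claim_equal_can_player_1_force_win := by
  unfold Claim_equal_can_player_1_force_win Spec_can_player_1_force_win
  intro n target _
  by_cases h0 : n ≤ 0
  · rw [pvA_eq, PySem.List.pyRange_one_eq_nil (by omega)]
    simp [can_player_1_force_win_alt, h0, pvWs_nil]
  · have hn0 : (0 : Int) < n := by omega
    have hopts := pvPyRange n (by omega)
    by_cases ht : target ≤ n
    · rw [pvA_eq]
      have hA : pvWs (PySem.List.pyRange 1 (n + 1) 1).sum target
          (PySem.List.pyRange 1 (n + 1) 1) = true := by
        rw [pvWs_eq]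
        refine List.any_eq_true.mpr ⟨n, PySem.List.mem_pyRange_one.mpr ⟨by omega, by omega⟩, ?_⟩
        have hd : (decide (target - ((PySem.List.pyRange 1 (n + 1) 1).sum -
            (PySem.List.pyRange 1 (n + 1) 1).sum) ≤ n)) = true := by
          simp only [sub_self, sub_zero]
          exact decide_eq_true ht
        rw [hd]
        simp
      rw [hA]
      simp [can_player_1_force_win_alt, h0, ht]
    · simp only [can_player_1_force_win_alt, if_neg h0, if_neg ht]
      obtain ⟨hlen, hinv⟩ := pvB_inv n.toNat (PySem.Int.floordiv (n * (n + 1)) 2) target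
        (2 ^ n.toNat - 1) le_rfl
      rw [hinv (2 ^ n.toNat - 1) le_rfl, pvOpts_full, pvA_eq, hopts]
      have hfd : PySem.Int.floordiv (n * (n + 1)) 2 =
          ((List.range n.toNat).map (fun j : Nat => (j : Int) + 1)).sum := by
        have hg := pvSum_range n.toNat
        have hn : ((n.toNat : Nat) : Int) = n := Int.toNat_of_nonneg (by omega)
        rw [hn] at hg
        rw [PySem.Int.floordiv_eq_ediv_of_pos (by norm_num : (0 : Int) < 2), ← hg]
        exact Int.mul_ediv_cancel_left _ (by norm_num)
      rw [hfd]
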